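-- pv_equiv track=rewrite | github.com/soloveva-am/PY-advanced_soloveva | src/iters_25.py | maxvalue
-- ===== SOURCE A (Python) =====
-- import itertools
--
-- def maxvalue(K, m):
--     M=0
--     for i in itertools.product(*K):
--        S=0
--        for j in i:
--             S+=j^2
--        S%=m
--        if S>M: M=S
--     return M
-- ===== SOURCE B (Python) =====
-- def maxvalue(K, m):
--     # DP over reachable residues mod m instead of enumerating the full cartesian product
--     residues = {0}
--     for lst in K:
--         residues = {(r + (x ^ 2)) % m for r in residues for x in lst}
--     return max(residues | {0})
-- ===== Notes on version B (the rewrite author's own statement) =====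
-- stated objective: faster
-- what changed: Instead of enumerating the whole cartesian product of K and taking the max of each tuple's (sum of x^2) mod m, B does a DP over the set of reachable residues mod m (one pass over K, updating a residue set per list) and returns the max of those residues and 0.
-- outside the precondition, e.g. on maxvalue([[23, 1, 8], [], [2, 0]], 0): A returns 0, B raises ZeroDivisionError
import Mathlib
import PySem

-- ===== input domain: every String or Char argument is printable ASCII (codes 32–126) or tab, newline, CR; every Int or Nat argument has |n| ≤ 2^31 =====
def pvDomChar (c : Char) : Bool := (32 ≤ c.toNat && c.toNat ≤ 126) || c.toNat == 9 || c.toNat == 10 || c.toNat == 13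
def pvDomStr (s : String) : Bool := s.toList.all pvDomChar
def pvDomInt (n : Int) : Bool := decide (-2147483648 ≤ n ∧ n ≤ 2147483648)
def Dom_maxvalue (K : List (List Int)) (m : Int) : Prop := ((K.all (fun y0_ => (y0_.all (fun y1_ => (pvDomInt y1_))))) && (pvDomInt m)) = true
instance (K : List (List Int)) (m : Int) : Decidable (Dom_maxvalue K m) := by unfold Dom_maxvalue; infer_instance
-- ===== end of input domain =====

-- B replaces A's scan of the whole cartesian product by a DP over the set of reachable
-- residues mod m (objective: faster, asymptotically).

-- ===== PORT A =====
-- itertools.product(*K), first list varying slowest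
def prodA : List (List Int) → List (List Int)
  | [] => [[]]
  | l :: ls => l.flatMap (fun x => (prodA ls).map (fun t => x :: t))

def maxvalue (K : List (List Int)) (m : Int) : Int :=
  (prodA K).foldl (fun M i =>
    let S := PySem.Int.mod (i.foldl (fun S j => S + PySem.Int.bxor j 2) 0) m
    if S > M then S else M) 0

-- ===== PORT B =====
-- one DP step: {(r + (x ^ 2)) % m for r in residues for x in lst}
def altStep (m : Int) (residues : PySem.Set Int) (lst : List Int) : PySem.Set Int :=
  residues.foldl (fun acc r =>
    lst.foldl (fun acc x =>
      PySem.Set.add acc (PySem.Int.mod (r + PySem.Int.bxor x 2) m)) acc)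
    PySem.Set.empty

def maxvalue_alt (K : List (List Int)) (m : Int) : Int :=
  let residues := K.foldl (altStep m) (PySem.Set.add PySem.Set.empty 0)
  -- max(residues | {0}): the union is nonempty (it contains 0), so Python's max never raises
  (PySem.List.max? (PySem.Set.union residues (PySem.Set.add PySem.Set.empty 0))
    (fun x => x)).getD 0

-- ===== PRECONDITION & SPEC =====
-- Pre_ excludes m = 0: Python's `% m` raises ZeroDivisionError in both A and B, except that when
-- some list of K is empty A's product loop never runs and A returns 0 while B still raises.
def Pre_maxvalue (K : List (List Int)) (m : Int) : Prop := m ≠ 0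
instance (K : List (List Int)) (m : Int) : Decidable (Pre_maxvalue K m) := by unfold Pre_maxvalue; infer_instance
def pvWitness_maxvalue : List (List Int) × Int := ([[1, 2], [3]], 5)

def Spec_maxvalue (K : List (List Int)) (m : Int) (out : Int) : Prop := out = maxvalue_alt K m
instance (K : List (List Int)) (m : Int) (out : Int) : Decidable (Spec_maxvalue K m out) := by unfold Spec_maxvalue; infer_instance

-- ===== CLAIM (what is proved, stated in full; the proofs are below) =====
def Claim_equal_maxvalue : Prop := ∀ (K : List (List Int)) (m : Int), Dom_maxvalue K m → Pre_maxvalue K m → Spec_maxvalue K m (maxvalue K m)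

-- ===== LEMMAS AND PROOFS =====

-- A's running max over the product equals a foldl max over the mapped list
theorem foldl_if_max (l : List (List Int)) (g : List Int → Int) :
    ∀ a : Int, l.foldl (fun M i => let S := g i; if S > M then S else M) a
      = (l.map g).foldl max a := by
  induction l with
  | nil => intro a; rfl
  | cons x t ih =>
    intro a
    simp only [List.foldl_cons, List.map_cons]
    rw [ih]
    congr 1
    split_ifs <;> omega

-- membership in the inner accumulation loop
theorem mem_foldl_add (f : Int → Int) (l : List Int) :
    ∀ (acc : PySem.Set Int) (x : Int),
      x ∈ l.foldl (fun acc y => PySem.Set.add acc (f y)) acc ↔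
        x ∈ acc ∨ ∃ y ∈ l, f y = x := by
  induction l with
  | nil => intro acc x; simp
  | cons y t ih =>
    intro acc x
    simp only [List.foldl_cons]
    rw [ih]
    rw [PySem.Set.mem_add]
    constructor
    · rintro ((h | h) | ⟨z, hz, hfz⟩)
      · exact Or.inl h
      · exact Or.inr ⟨y, by simp, h.symm⟩
      · exact Or.inr ⟨z, by simp [hz], hfz⟩
    · rintro (h | ⟨z, hz, hfz⟩)
      · exact Or.inl (Or.inl h)
      · rcases List.mem_cons.mp hz with rfl | hz
        · exact Or.inl (Or.inr hfz.symm)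
        · exact Or.inr ⟨z, hz, hfz⟩

-- membership in one DP step
theorem mem_altStep (m : Int) (S : PySem.Set Int) (lst : List Int) (x : Int) :
    x ∈ altStep m S lst ↔ ∃ r ∈ S, ∃ y ∈ lst, PySem.Int.mod (r + PySem.Int.bxor y 2) m = x := by
  unfold altStep
  suffices h : ∀ acc : PySem.Set Int,
      x ∈ S.foldl (fun acc r => lst.foldl (fun acc x =>
          PySem.Set.add acc (PySem.Int.mod (r + PySem.Int.bxor x 2) m)) acc) acc ↔
        x ∈ acc ∨ ∃ r ∈ S, ∃ y ∈ lst, PySem.Int.mod (r + PySem.Int.bxor y 2) m = x by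
    have := h PySem.Set.empty
    simpa [PySem.Set.empty] using this
  induction S with
  | nil => intro acc; simp
  | cons r t ih =>
    intro acc
    simp only [List.foldl_cons]
    rw [ih]
    rw [mem_foldl_add]
    constructor
    · rintro (⟨h | ⟨y, hy, hxy⟩⟩ | ⟨r', hr', y, hy, hxy⟩)
      · exact Or.inl h
      · exact Or.inr ⟨r, by simp, y, hy, hxy⟩
      · exact Or.inr ⟨r', by simp [hr'], y, hy, hxy⟩
    · rintro (h | ⟨r', hr', y, hy, hxy⟩)
      · exact Or.inl (Or.inl h)
      · rcases List.mem_cons.mp hr' with rfl | hr'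
        · exact Or.inl (Or.inr ⟨y, hy, hxy⟩)
        · exact Or.inr ⟨r', hr', y, hy, hxy⟩

-- B's per-tuple chain of mods
def chain (m r : Int) (t : List Int) : Int :=
  t.foldl (fun r x => PySem.Int.mod (r + PySem.Int.bxor x 2) m) r

theorem chain_mod (m : Int) (t : List Int) :
    ∀ r : Int, chain m (PySem.Int.mod r m) t
      = PySem.Int.mod (t.foldl (fun S j => S + PySem.Int.bxor j 2) r) m := by
  induction t with
  | nil => intro r; rfl
  | cons x t ih =>
    intro r
    show chain m (PySem.Int.mod (PySem.Int.mod r m + PySem.Int.bxor x 2) m) t = _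
    have hcongr : PySem.Int.mod (PySem.Int.mod r m + PySem.Int.bxor x 2) m
        = PySem.Int.mod (r + PySem.Int.bxor x 2) m := Int.fmod_add_fmod r m _
    rw [hcongr, ih (r + PySem.Int.bxor x 2)]
    rfl

-- the DP invariant: reachable residues = per-tuple chains over the product
theorem mem_foldl_altStep (m : Int) :
    ∀ (K : List (List Int)) (S : PySem.Set Int) (x : Int),
      x ∈ K.foldl (altStep m) S ↔ ∃ r ∈ S, ∃ t ∈ prodA K, chain m r t = x := by
  intro K
  induction K with
  | nil =>
    intro S x
    simp [prodA, chain]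
  | cons l ls ih =>
    intro S x
    simp only [List.foldl_cons]
    rw [ih]
    constructor
    · rintro ⟨r', hr', t, ht, hct⟩
      rcases (mem_altStep m S l r').mp hr' with ⟨r, hr, y, hy, hry⟩
      refine ⟨r, hr, y :: t, ?_, ?_⟩
      · simp only [prodA, List.mem_flatMap, List.mem_map]
        exact ⟨y, hy, t, ht, rfl⟩
      · show chain m (PySem.Int.mod (r + PySem.Int.bxor y 2) m) t = x
        rw [hry]; exact hct
    · rintro ⟨r, hr, t, ht, hct⟩
      simp only [prodA, List.mem_flatMap, List.mem_map] at ht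
      rcases ht with ⟨y, hy, t', ht', rfl⟩
      refine ⟨PySem.Int.mod (r + PySem.Int.bxor y 2) m, ?_, t', ht', hct⟩
      exact (mem_altStep m S l _).mpr ⟨r, hr, y, hy, rfl⟩

-- A's per-tuple value is a chain from residue 0
theorem chain_zero (m : Int) (t : List Int) :
    chain m 0 t = PySem.Int.mod (t.foldl (fun S j => S + PySem.Int.bxor j 2) 0) m := by
  have h := chain_mod m t 0
  have h0 : PySem.Int.mod 0 m = 0 := Int.zero_fmod m
  rw [h0] at h
  exact h

-- ===== VERDICT (by name: the statement is the Claim_ definition above) =====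
theorem maxvalue_spec : Claim_equal_maxvalue := by
  intro K m _ _
  unfold Spec_maxvalue maxvalue maxvalue_alt
  set g : List Int → Int :=
    fun i => PySem.Int.mod (i.foldl (fun S j => S + PySem.Int.bxor j 2) 0) m with hg
  rw [foldl_if_max (prodA K) g 0]
  set L : List Int := (prodA K).map g with hL
  set R : PySem.Set Int := K.foldl (altStep m) (PySem.Set.add PySem.Set.empty 0) with hR
  -- membership in R ↔ membership in L
  have hmemR : ∀ x, x ∈ R ↔ x ∈ L := by
    intro x
    rw [hR, mem_foldl_altStep m K]
    constructor
    · rintro ⟨r, hr, t, ht, hct⟩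
      have : r = 0 := by simpa [PySem.Set.add, PySem.Set.empty] using hr
      subst this
      rw [hL]
      refine List.mem_map.mpr ⟨t, ht, ?_⟩
      have h' := hct
      rw [chain_zero m t] at h'
      exact h'
    · intro hx
      rcases List.mem_map.mp hx with ⟨t, ht, hgt⟩
      exact ⟨0, by simp [PySem.Set.add, PySem.Set.empty], t, ht,
        by rw [chain_zero m t]; exact hgt⟩
  set U : PySem.Set Int := PySem.Set.union R (PySem.Set.add PySem.Set.empty 0) with hU
  have hmemU : ∀ x, x ∈ U ↔ x ∈ R ∨ x = 0 := fun x => PySem.Set.mem_add R 0 x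
  have h0U : (0 : Int) ∈ U := (hmemU 0).mpr (Or.inr rfl)
  have hUne : U ≠ [] := List.ne_nil_of_mem h0U
  obtain ⟨v, hv⟩ : ∃ v, PySem.List.max? U (fun x => x) = some v := by
    cases h : PySem.List.max? U (fun x => x) with
    | none => exact absurd ((PySem.List.max?_eq_none_iff U _).mp h) hUne
    | some v => exact ⟨v, rfl⟩
  show L.foldl max 0 = (PySem.List.max? U fun x => x).getD 0
  rw [hv]
  show L.foldl max 0 = v
  have hvU : v ∈ U := PySem.List.max?_mem hv
  have hvMax : ∀ y ∈ U, y ≤ v := PySem.List.max?_isMax hv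
  have hA := PySem.List.le_foldl_max L 0
  apply le_antisymm
  · rcases PySem.List.foldl_max_mem L 0 with h | h
    · rw [h]; exact hvMax 0 h0U
    · exact hvMax _ ((hmemU _).mpr (Or.inl ((hmemR _).mpr h)))
  · rcases (hmemU v).mp hvU with h | h
    · exact hA.2 v ((hmemR v).mp h)
    · rw [h]; exact hA.1
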